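-- pv_equiv track=rewrite | github.com/weisserj/scrobble-cli | scrobble_cli/timestamps.py | plan_from_end
-- ===== SOURCE A (Python) =====
-- def plan_from_end(end_unix: int, durations: list[int]) -> list[int]:
--   total = sum(durations)
--   start = end_unix - total
--   out = []
--   t = start
--   for d in durations:
--     out.append(t)
--     t += d
--   return out
-- ===== SOURCE B (Python) =====
-- def plan_from_end(end_unix: int, durations: list[int]) -> list[int]:
--   out = [0] * len(durations)
--   suffix = 0
--   for i in range(len(durations) - 1, -1, -1):
--     suffix += durations[i]
--     out[i] = end_unix - suffix
--   return out
-- ===== Notes on version B (the rewrite author's own statement) =====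
-- stated objective: alternative
-- what changed: Replaces A's sum()-then-forward-append prefix loop with a countdown index loop that accumulates a suffix sum and writes each start into a preallocated array in place; there is no total pass and no append-based forward accumulation.
import Mathlib
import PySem

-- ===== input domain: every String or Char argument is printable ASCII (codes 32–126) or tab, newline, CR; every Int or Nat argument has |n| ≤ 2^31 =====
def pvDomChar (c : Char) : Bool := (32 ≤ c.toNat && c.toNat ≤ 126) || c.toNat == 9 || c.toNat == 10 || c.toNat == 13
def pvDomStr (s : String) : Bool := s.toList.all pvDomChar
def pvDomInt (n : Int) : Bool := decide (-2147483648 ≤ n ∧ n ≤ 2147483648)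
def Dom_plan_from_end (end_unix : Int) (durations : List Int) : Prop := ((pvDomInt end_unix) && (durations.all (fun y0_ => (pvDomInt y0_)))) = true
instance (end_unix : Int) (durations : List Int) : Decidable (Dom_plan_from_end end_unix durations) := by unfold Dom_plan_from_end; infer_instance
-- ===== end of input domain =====

-- B replaces A's sum-then-forward-append prefix loop with a countdown index loop that
-- accumulates a suffix sum and writes starts into a preallocated array: alternative decomposition, same cost.


-- ===== PORT A =====
-- total = sum(durations); start = end - total; forward loop appending t then t += d
def plan_from_end (end_unix : Int) (durations : List Int) : List Int :=
  let total := durations.sum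
  let start := end_unix - total
  (durations.foldl (fun (st : List Int × Int) d => (st.1 ++ [st.2], st.2 + d)) ([], start)).1

-- ===== PORT B =====
-- out = [0]*len(durations); suffix = 0; for i in range(len-1, -1, -1): suffix += durations[i]; out[i] = end - suffix
def plan_from_end_alt (end_unix : Int) (durations : List Int) : List Int :=
  ((PySem.List.pyRange ((durations.length : Int) - 1) (-1) (-1)).foldl
     (fun (st : Int × List Int) i =>
        let suffix := st.1 + PySem.List.pyGetD durations i 0
        (suffix, st.2.set i.toNat (end_unix - suffix)))
     (0, List.replicate durations.length 0)).2

-- ===== PRECONDITION & SPEC =====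
def Spec_plan_from_end (end_unix : Int) (durations : List Int) (out : List Int) : Prop := out = plan_from_end_alt end_unix durations
instance (end_unix : Int) (durations : List Int) (out : List Int) : Decidable (Spec_plan_from_end end_unix durations out) := by unfold Spec_plan_from_end; infer_instance

-- ===== CLAIM (what is proved, stated in full; the proofs are below) =====
def Claim_equal_plan_from_end : Prop := ∀ (end_unix : Int) (durations : List Int), Dom_plan_from_end end_unix durations → Spec_plan_from_end end_unix durations (plan_from_end end_unix durations)

-- ===== LEMMAS AND PROOFS =====

/-- closed form of A's forward loop: starts at t, each element is t plus the prefix sum so far -/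
def fwd (t : Int) : List Int → List Int
  | [] => []
  | d :: ds => t :: fwd (t + d) ds

theorem foldlA_eq (ds : List Int) : ∀ (acc : List Int) (t : Int),
    (ds.foldl (fun (st : List Int × Int) d => (st.1 ++ [st.2], st.2 + d)) (acc, t)).1
      = acc ++ fwd t ds := by
  induction ds with
  | nil => intro acc t; simp [fwd]
  | cons d ds ih =>
      intro acc t
      simp [List.foldl, fwd, ih (acc ++ [t]) (t + d)]

theorem fwd_snoc (xs : List Int) (d : Int) : ∀ (t : Int),
    fwd t (xs ++ [d]) = fwd t xs ++ [t + xs.sum] := by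
  induction xs with
  | nil => intro t; simp [fwd]
  | cons x xs ih =>
      intro t
      simp [fwd, ih (t + x)]
      ring

/-- drop at the written index: setting position m then dropping m exposes the new value -/
theorem drop_set_cons {α : Type} (out : List α) (m : Nat) (v : α) (hm : m < out.length) :
    (out.set m v).drop m = v :: out.drop (m + 1) := by
  rw [List.drop_eq_getElem_cons (by simpa using hm)]
  refine congrArg₂ _ ?_ ?_
  · simp
  · rw [List.drop_set]; simp

/-- invariant of B's countdown loop -/
theorem foldB_eq (e : Int) (ds : List Int) : ∀ (m : Nat) (s0 : Int) (out : List Int),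
    m ≤ ds.length → out.length = ds.length →
    ((PySem.List.pyRange ((m : Int) - 1) (-1) (-1)).foldl
       (fun (st : Int × List Int) i =>
          let suffix := st.1 + PySem.List.pyGetD ds i 0
          (suffix, st.2.set i.toNat (e - suffix)))
       (s0, out)).2
      = fwd (e - s0 - (ds.take m).sum) (ds.take m) ++ out.drop m := by
  intro m
  induction m with
  | zero =>
      intro s0 out _ _
      rw [PySem.List.pyRange_neg_one_eq_nil (by norm_num)]
      simp [fwd]
  | succ m ih =>
      intro s0 out hm hlen
      have hmlt : m < ds.length := Nat.lt_of_succ_le hm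
      have hget : PySem.List.pyGetD ds (m : Int) 0 = ds[m] := by
        simp [PySem.List.pyGetD_natCast, List.getD_eq_getElem?_getD, List.getElem?_eq_getElem hmlt]
      rw [show ((m + 1 : Nat) : Int) - 1 = (m : Int) by push_cast; ring,
        PySem.List.pyRange_neg_one_cons (by omega)]
      simp only [List.foldl_cons, hget, Int.toNat_natCast]
      rw [ih (s0 + ds[m]) (out.set m (e - (s0 + ds[m]))) (Nat.le_of_lt hmlt) (by simpa using hlen),
        drop_set_cons out m _ (by omega),
        List.take_add_one, List.getElem?_eq_getElem hmlt]
      simp only [Option.toList_some]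
      rw [fwd_snoc]
      have h1 : e - s0 - (ds.take m ++ [ds[m]]).sum = e - (s0 + ds[m]) - (ds.take m).sum := by
        rw [List.sum_append, List.sum_cons, List.sum_nil]; ring
      have h2 : e - (s0 + ds[m]) - (ds.take m).sum + (ds.take m).sum = e - (s0 + ds[m]) := by ring
      rw [h1, h2]
      simp

-- ===== VERDICT (by name: the statement is the Claim_ definition above) =====
theorem plan_from_end_spec : Claim_equal_plan_from_end := by
  intro e ds _
  unfold Spec_plan_from_end plan_from_end plan_from_end_alt
  rw [foldlA_eq, foldB_eq e ds ds.length 0 (List.replicate ds.length 0) le_rfl (by simp)]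
  simp
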